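-- pv_equiv track=rewrite | github.com/IgorXGithub/Belhard | 6.7.py | neighbors_sum
-- ===== SOURCE A (Python) =====
-- def neighbors_sum(numbers):
--     neighbors_sum = []
--     length = len(numbers)
--     for i in range(length):
--         left_neighbor = numbers[(i - 1) % length]
--         right_neighbor = numbers[(i + 1) % length]
--         neighbors_sum.append(left_neighbor + right_neighbor)
--
--     return neighbors_sum
-- ===== SOURCE B (Python) =====
-- def neighbors_sum(numbers):
--     left = numbers[-1:] + numbers[:-1]
--     right = numbers[1:] + numbers[:1]
--     return [l + r for l, r in zip(left, right)]
-- ===== Notes on version B (the rewrite author's own statement) =====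
-- stated objective: idiomatic
-- what changed: Replaces per-element modular indexing in an index loop by two whole-list rotations (slices) combined with zip in one pairwise pass.
import Mathlib
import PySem

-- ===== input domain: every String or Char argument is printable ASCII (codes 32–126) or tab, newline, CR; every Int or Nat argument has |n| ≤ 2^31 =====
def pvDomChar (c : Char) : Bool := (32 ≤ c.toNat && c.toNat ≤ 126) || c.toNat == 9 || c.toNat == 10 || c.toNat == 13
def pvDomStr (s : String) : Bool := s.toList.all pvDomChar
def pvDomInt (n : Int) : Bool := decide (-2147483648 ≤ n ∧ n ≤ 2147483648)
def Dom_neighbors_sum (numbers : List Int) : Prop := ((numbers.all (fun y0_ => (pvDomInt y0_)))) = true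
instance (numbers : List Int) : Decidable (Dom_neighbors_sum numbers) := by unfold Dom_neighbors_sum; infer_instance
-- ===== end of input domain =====

-- B replaces the modular-index loop by two slice rotations combined with zip (idiomatic, same cost).


-- ===== PORT A =====
-- for i in range(length): append numbers[(i-1)%length] + numbers[(i+1)%length]
-- (the index is always in range, so pyGetD's default is never used)
def neighbors_sum (numbers : List Int) : List Int :=
  let length : Int := numbers.length
  (PySem.List.pyRange 0 length 1).foldl
    (fun acc i =>
      acc ++ [PySem.List.pyGetD numbers (PySem.Int.mod (i - 1) length) 0 +
              PySem.List.pyGetD numbers (PySem.Int.mod (i + 1) length) 0]) []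

-- ===== PORT B =====
def neighbors_sum_alt (numbers : List Int) : List Int :=
  let left := PySem.List.slice numbers (some (-1)) none ++ PySem.List.slice numbers none (some (-1))
  let right := PySem.List.slice numbers (some 1) none ++ PySem.List.slice numbers none (some 1)
  (left.zip right).map (fun p => p.1 + p.2)

-- ===== PRECONDITION & SPEC =====
def Spec_neighbors_sum (numbers : List Int) (out : List Int) : Prop := out = neighbors_sum_alt numbers
instance (numbers : List Int) (out : List Int) : Decidable (Spec_neighbors_sum numbers out) := by unfold Spec_neighbors_sum; infer_instance

-- ===== CLAIM (what is proved, stated in full; the proofs are below) =====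
def Claim_equal_neighbors_sum : Prop := ∀ (numbers : List Int), Dom_neighbors_sum numbers → Spec_neighbors_sum numbers (neighbors_sum numbers)

-- ===== LEMMAS AND PROOFS =====

-- ===== VERDICT (by name: the statement is the Claim_ definition above) =====
theorem emod_neg_one (n : Int) (h : 0 < n) : (-1) % n = n - 1 := by
  have h2 : ((-1 : Int) + n * 1) % n = (-1 : Int) % n := Int.add_mul_emod_self_left ..
  have h3 : ((-1 : Int) + n * 1) % n = (-1 : Int) + n * 1 :=
    Int.emod_eq_of_lt (by omega) (by omega)
  omega

theorem neighbors_sum_spec : Claim_equal_neighbors_sum := by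
  intro numbers _
  unfold Spec_neighbors_sum neighbors_sum neighbors_sum_alt
  rcases numbers with _ | ⟨x, xs⟩
  · simp [PySem.List.pyRange_one_eq_nil, PySem.List.slice]
  · set ns := x :: xs with hns
    have hnpos : 0 < ns.length := by simp [hns]
    have hmodpos : (0:Int) < (ns.length : Int) := by exact_mod_cast hnpos
    rw [PySem.List.foldl_append_singleton_eq_map]
    rw [PySem.List.slice_from_neg_one, PySem.List.slice_to_neg_one,
        PySem.List.slice_from_one, PySem.List.slice_to ns (by omega : (0:Int) ≤ 1)]
    have hld : (ns.drop (ns.length - 1)).length = 1 := by simp; omega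
    have hlt : ns.tail.length = ns.length - 1 := by simp
    have hlk : ns.take (1:Int).toNat = [ns[0]'(by omega)] := by
      rcases ns with _ | ⟨y, ys⟩
      · simp at hnpos
      · simp [Int.toNat]
    apply List.ext_getElem
    · simp [PySem.List.length_pyRange_one, hld, hlt]
      omega
    · intro k h1 h2
      have hk : k < ns.length := by
        simpa [PySem.List.length_pyRange_one] using h1
      simp only [List.nil_append, List.getElem_map, PySem.List.getElem_pyRange_one,
        List.getElem_zip, PySem.Int.mod_eq_emod_of_pos hmodpos]
      -- left element: ((n-1)-rotation)[k] = numbers[(k-1) % n]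
      have hleft : ∀ (hh : k < (ns.drop (ns.length - 1) ++ ns.dropLast).length),
          (ns.drop (ns.length - 1) ++ ns.dropLast)[k]'hh =
          PySem.List.pyGetD ns ((0 + (k:Int) - 1) % ns.length) 0 := by
        intro hh
        rcases Nat.eq_zero_or_pos k with hk0 | hkpos
        · subst hk0
          have hm : ((0:Int) + (0:Nat) - 1) % (ns.length:Int) = (ns.length:Int) - 1 := by
            push_cast
            exact emod_neg_one _ hmodpos
          rw [hm, PySem.List.pyGetD_eq_getElem _ _ (by omega) (by omega)]
          rw [List.getElem_append_left (by omega)]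
          rw [List.getElem_drop]
          congr 1
          omega
        · have hm : ((0:Int) + (k:Nat) - 1) % (ns.length:Int) = ((k:Int) - 1) := by
            rw [Int.emod_eq_of_lt (by omega) (by omega)]
            ring
          rw [hm, PySem.List.pyGetD_eq_getElem _ _ (by omega) (by omega)]
          rw [List.getElem_append_right (by omega)]
          rw [List.getElem_dropLast]
          congr 1
          omega
      -- right element: (1-rotation)[k] = numbers[(k+1) % n]
      have hright : ∀ (hh : k < (ns.tail ++ ns.take (1:Int).toNat).length),
          (ns.tail ++ ns.take (1:Int).toNat)[k]'hh =
          PySem.List.pyGetD ns ((0 + (k:Int) + 1) % ns.length) 0 := by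
        intro hh
        rcases Nat.lt_or_ge k (ns.length - 1) with hklt | hkge
        · have hm : ((0:Int) + (k:Nat) + 1) % (ns.length:Int) = ((k:Int) + 1) := by
            rw [Int.emod_eq_of_lt (by omega) (by omega)]
            ring
          rw [hm, PySem.List.pyGetD_eq_getElem _ _ (by omega) (by omega)]
          rw [List.getElem_append_left (by omega)]
          rw [List.getElem_tail]
          congr 1
        · have hkeq : k = ns.length - 1 := by omega
          have hm : ((0:Int) + (k:Nat) + 1) % (ns.length:Int) = 0 := by
            have he : ((0:Int) + (k:Nat) + 1) = (ns.length : Int) := by omega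
            rw [he]
            exact Int.emod_self
          rw [hm, PySem.List.pyGetD_eq_getElem _ _ (by omega) (by omega)]
          rw [List.getElem_append_right (by omega)]
          simp [hlt, hkeq]
      rw [hleft, hright]
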